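-- pv_equiv track=rewrite | github.com/Haktary/myPacketTrace | trace.py | get_argument
-- ===== SOURCE A (Python) =====
-- def get_argument(command) :
--     arguments = []
--     try :
--         args = command[1].split(')')[0].split(',')
--         n = 0
--         while(len(args) > n ) :
--             arg = args[n].split(' ')
--             y = 0
--             while(len(arg) > y) :
--                 if(arg[y] != '') :
--                     arguments.append(arg[y])
--
--                 y = y + 1
--
--             n = n + 1
--     except :
--         pass
--
--     return arguments
-- ===== SOURCE B (Python) =====
-- import re
--
-- def get_argument(command):
--     try:
--         prefix = command[1].partition(')')[0]
--     except Exception: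
--         return []
--     return re.findall(r'[^ ,]+', prefix)
-- ===== Notes on version B (the rewrite author's own statement) =====
-- stated objective: idiomatic
-- what changed: Replaces the index-driven nested while loops over split(',') then split(' ') with partition(')') plus a single regex pass re.findall(r'[^ ,]+') extracting maximal runs of non-separator characters.
import Mathlib
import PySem

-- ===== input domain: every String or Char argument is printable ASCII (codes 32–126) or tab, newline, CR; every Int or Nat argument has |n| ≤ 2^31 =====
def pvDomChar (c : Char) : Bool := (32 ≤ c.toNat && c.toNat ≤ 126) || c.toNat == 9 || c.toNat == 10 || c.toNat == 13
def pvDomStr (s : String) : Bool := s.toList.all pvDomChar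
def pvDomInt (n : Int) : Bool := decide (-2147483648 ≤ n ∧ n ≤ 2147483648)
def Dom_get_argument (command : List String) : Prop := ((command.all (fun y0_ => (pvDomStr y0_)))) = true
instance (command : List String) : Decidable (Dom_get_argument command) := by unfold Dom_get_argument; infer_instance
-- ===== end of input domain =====

-- B replaces the index-driven nested split loops with partition(')') and one regex pass [^ ,]+ (idiomatic, same cost).


-- ===== PORT A =====
-- literal port: command[1] (IndexError caught → []), split(')')[0], split(','),
-- index loop over the pieces, inner index loop over piece.split(' ') appending non-empty
-- tokens; the 'none' branches of split? (sep = "") are unreachable here (try/except → [])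
def get_argument (command : List String) : List String :=
  match PySem.List.pyGet? command 1 with
  | none => []
  | some s =>
    match PySem.Str.split? s ")" with
    | none => []
    | some parts =>
      match PySem.List.pyGet? parts 0 with
      | none => []
      | some p =>
        match PySem.Str.split? p "," with
        | none => []
        | some args =>
          args.foldl (fun acc a =>
            match PySem.Str.split? a " " with
            | none => acc
            | some arg =>
              arg.foldl (fun acc2 w => if w ≠ "" then acc2 ++ [w] else acc2) acc) []

-- ===== PORT B =====
-- hand port of re.findall(r'[^ ,]+', prefix): exact for this regex — the maximal runs of
-- characters other than ' ' and ',' in order; cur is the run being built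
def pvScan : List Char → List Char → List String
  | [], cur => if cur = [] then [] else [String.ofList cur]
  | c :: rest, cur =>
    if c = ' ' ∨ c = ',' then
      (if cur = [] then pvScan rest [] else String.ofList cur :: pvScan rest [])
    else pvScan rest (cur ++ [c])

-- prefix = command[1].partition(')')[0]: exactly the characters before the first ')'
def get_argument_alt (command : List String) : List String :=
  match PySem.List.pyGet? command 1 with
  | none => []
  | some s => pvScan (s.toList.takeWhile (fun c => c != ')')) []

-- ===== PRECONDITION & SPEC =====
def Spec_get_argument (command : List String) (out : List String) : Prop := out = get_argument_alt command
instance (command : List String) (out : List String) : Decidable (Spec_get_argument command out) := by unfold Spec_get_argument; infer_instance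

-- ===== CLAIM (what is proved, stated in full; the proofs are below) =====
def Claim_equal_get_argument : Prop := ∀ (command : List String), Dom_get_argument command → Spec_get_argument command (get_argument command)

-- ===== LEMMAS AND PROOFS =====

-- split on a single character, written structurally
def pvSplitC (c : Char) : List Char → List (List Char)
  | [] => [[]]
  | x :: xs => if x = c then [] :: pvSplitC c xs else (pvSplitC c xs).modifyHead (x :: ·)

-- split on either separator (' ' or ','), keeping empty pieces
def pvSplitT : List Char → List (List Char)
  | [] => [[]]
  | x :: xs => if x = ' ' ∨ x = ',' then [] :: pvSplitT xs else (pvSplitT xs).modifyHead (x :: ·)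

lemma pvModifyHead_id {α : Type} (L : List α) : List.modifyHead (fun y => y) L = L := by
  cases L <;> simp

lemma pvSplitC_ne_nil (c : Char) (l : List Char) : pvSplitC c l ≠ [] := by
  induction l with
  | nil => simp [pvSplitC]
  | cons x xs ih =>
    simp only [pvSplitC]
    split_ifs
    · simp
    · cases h : pvSplitC c xs with
      | nil => exact absurd h ih
      | cons a t => simp [List.modifyHead]

lemma pvSplitT_ne_nil (l : List Char) : pvSplitT l ≠ [] := by
  induction l with
  | nil => simp [pvSplitT]
  | cons x xs ih =>
    simp only [pvSplitT]
    split_ifs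
    · simp
    · cases h : pvSplitT xs with
      | nil => exact absurd h ih
      | cons a t => simp [List.modifyHead]

lemma go_spec (c : Char) (l : List Char) (fuel : Nat) (cur : List Char)
    (acc : List (List Char)) (h : l.length < fuel) :
    PySem.Chars.splitOn.go [c] fuel l cur acc
      = acc.reverse ++ (pvSplitC c l).modifyHead (cur.reverse ++ ·) := by
  induction l generalizing fuel cur acc with
  | nil =>
    cases fuel with
    | zero => omega
    | succ f => simp [PySem.Chars.splitOn.go, pvSplitC]
  | cons x xs ih =>
    cases fuel with
    | zero => omega
    | succ f =>
      by_cases hx : x = c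
      · subst hx
        simp only [PySem.Chars.splitOn.go, List.isPrefixOf, BEq.rfl, Bool.true_and,
          List.isPrefixOf_nil_left, if_true, List.length_cons, List.drop_succ_cons,
          List.length_nil, List.drop_zero]
        rw [ih f [] ((cur.reverse) :: acc) (by simpa using Nat.lt_of_succ_lt_succ h)]
        simp [pvSplitC, pvModifyHead_id]
      · have hpre : [c].isPrefixOf (x :: xs) = false := by
          simp [List.isPrefixOf]
          exact fun hc => hx hc.symm
        simp only [PySem.Chars.splitOn.go, hpre, Bool.false_eq_true, if_false]
        rw [ih f (x :: cur) acc (by simpa using Nat.lt_of_succ_lt_succ h)]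
        have hne := pvSplitC_ne_nil c xs
        cases hsp : pvSplitC c xs with
        | nil => exact absurd hsp hne
        | cons a t => simp [pvSplitC, hx, hsp, List.modifyHead]

lemma splitOn_single (l : List Char) (c : Char) :
    PySem.Chars.splitOn l [c] = pvSplitC c l := by
  have h := go_spec c l (l.length + 1) [] [] (by omega)
  simpa [PySem.Chars.splitOn, pvModifyHead_id] using h

lemma str_split (s : String) (c : Char) :
    PySem.Str.split? s (String.ofList [c])
      = some ((pvSplitC c s.toList).map String.ofList) := by
  simp [PySem.Str.split?, PySem.Chars.split?, splitOn_single]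

lemma pvSplitC_head? (c : Char) (l : List Char) :
    (pvSplitC c l).head? = some (l.takeWhile (fun x => x != c)) := by
  induction l with
  | nil => simp [pvSplitC, List.takeWhile]
  | cons x xs ih =>
    by_cases hx : x = c
    · simp [pvSplitC, List.takeWhile, hx]
    · have hb : (x != c) = true := by simpa using hx
      cases hsp : pvSplitC c xs with
      | nil => exact absurd hsp (pvSplitC_ne_nil c xs)
      | cons a t =>
        rw [hsp] at ih
        simp only [List.head?_cons, Option.some.injEq] at ih
        simp [pvSplitC, List.takeWhile, hx, hsp, List.modifyHead, ih, hb]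

lemma flatMap_split (p : List Char) :
    (pvSplitC ',' p).flatMap (pvSplitC ' ') = pvSplitT p := by
  induction p with
  | nil => simp [pvSplitC, pvSplitT]
  | cons x xs ih =>
    by_cases hx : x = ','
    · simp [pvSplitC, pvSplitT, hx, ← ih]
    · cases hsp : pvSplitC ',' xs with
      | nil => exact absurd hsp (pvSplitC_ne_nil ',' xs)
      | cons a t =>
        rw [hsp] at ih
        by_cases hs : x = ' '
        · simp only [pvSplitC, pvSplitT, hx, hs, if_false, if_true, hsp,
            List.modifyHead, List.flatMap_cons, ← ih]
          simp [pvSplitC]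
        · have hor : ¬ (x = ' ' ∨ x = ',') := by tauto
          simp only [pvSplitC, pvSplitT, hx, hor, if_false, hsp, List.modifyHead,
            List.flatMap_cons, ← ih]
          cases hsa : pvSplitC ' ' a with
          | nil => exact absurd hsa (pvSplitC_ne_nil ' ' a)
          | cons b u => simp [pvSplitC, hs, hsa, List.modifyHead]

lemma scan_spec (p cur : List Char) :
    pvScan p cur
      = (((pvSplitT p).modifyHead (cur ++ ·)).filter (fun l => l ≠ [])).map String.ofList := by
  induction p generalizing cur with
  | nil => by_cases h : cur = [] <;> simp [pvScan, pvSplitT, List.modifyHead, h]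
  | cons x xs ih =>
    have hnil : List.modifyHead (fun l => ([] : List Char) ++ l) (pvSplitT xs) = pvSplitT xs := by
      cases pvSplitT xs <;> simp
    by_cases hx : x = ' ' ∨ x = ','
    · have ih0 := ih []
      rw [hnil] at ih0
      by_cases h : cur = [] <;> simp [pvScan, pvSplitT, hx, h, List.modifyHead, ih0]
    · cases hsp : pvSplitT xs with
      | nil => exact absurd hsp (pvSplitT_ne_nil xs)
      | cons a t =>
        have ihc := ih (cur ++ [x])
        rw [hsp] at ihc
        simp only [pvScan, pvSplitT, hx, if_false, hsp, List.modifyHead] at ihc ⊢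
        simpa using ihc

lemma ofList_ne_empty_iff (l : List Char) : (String.ofList l ≠ "") ↔ l ≠ [] := by
  rw [not_iff_not]
  constructor
  · intro h
    have := congrArg String.toList h
    simpa using this
  · intro h
    simp [h]

lemma ofList_eq_empty_iff (l : List Char) : (String.ofList l = "") ↔ l = [] := by
  have := ofList_ne_empty_iff l
  tauto

-- ===== VERDICT (by name: the statement is the Claim_ definition above) =====
theorem get_argument_spec : Claim_equal_get_argument := by
  intro command _
  unfold Spec_get_argument get_argument get_argument_alt
  cases hg : PySem.List.pyGet? command 1 with
  | none => rfl
  | some s =>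
    dsimp only
    have hrp : (")" : String) = String.ofList [')'] := rfl
    rw [hrp, str_split]
    have hh := pvSplitC_head? ')' s.toList
    cases hsp : pvSplitC ')' s.toList with
    | nil => exact absurd hsp (pvSplitC_ne_nil ')' s.toList)
    | cons a t =>
      rw [hsp] at hh
      simp only [List.head?_cons, Option.some.injEq] at hh
      simp only [List.map_cons]
      have hz : PySem.List.pyGet? (String.ofList a :: List.map String.ofList t) 0
          = some (String.ofList a) := by
        simp [PySem.List.pyGet?, PySem.List.pyIdx?]
      rw [hz]
      dsimp only
      rw [← hh]
      have hcm : ("," : String) = String.ofList [','] := rfl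
      have hsm : (" " : String) = String.ofList [' '] := rfl
      rw [hcm, str_split]
      dsimp only
      have hinner : ∀ (acc : List String) (l : List Char), l ∈ pvSplitC ',' a →
          (match PySem.Str.split? (String.ofList l) " " with
            | none => acc
            | some arg =>
              arg.foldl (fun acc2 w => if w ≠ "" then acc2 ++ [w] else acc2) acc)
          = acc ++ ((pvSplitC ' ' l).filter (fun m => m ≠ [])).map String.ofList := by
        intro acc l _
        rw [hsm, str_split]
        dsimp only
        rw [PySem.List.foldl_append_ite_eq_filter, List.filter_map]
        have htl : (String.ofList l).toList = l := by simp
        rw [htl]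
        congr 1
        congr 1
        refine List.filter_congr ?_
        intro m _
        simp [Function.comp, ofList_eq_empty_iff]
      rw [List.foldl_map]
      have hta : (String.ofList a).toList = a := by simp
      rw [hta]
      rw [PySem.List.foldl_congr_mem _ _
        (fun acc l => acc ++ ((pvSplitC ' ' l).filter (fun m => m ≠ [])).map String.ofList)
        [] (by intro acc x hx; exact hinner acc x hx)]
      rw [PySem.List.foldl_append_eq_flatMap]
      rw [List.nil_append]
      rw [scan_spec]
      have hmod : (pvSplitT a).modifyHead (fun x => ([] : List Char) ++ x) = pvSplitT a := by
        cases pvSplitT a <;> simp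
      rw [hmod, ← flatMap_split, List.filter_flatMap, List.map_flatMap]
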